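-- pv_equiv track=rewrite | github.com/shhuan1989/algorithms | leetcode/medium/Largest_1_Board_Square.py | largest1BorderedSquare1
-- ===== SOURCE A (Python) =====
-- from typing import List
--
-- def largest1BorderedSquare1(grid: List[List[int]]) -> int:
--     m, n = len(grid), len(grid[0])
--
--     for l in range(max(m, n), 0, -1):
--         for sr in range(m-l+1):
--             for sc in range(n-l+1):
--                 if all([grid[sr][c]==1 for c in range(sc, sc+l)]) and \
--                     all([grid[sr+l-1][c] for c in range(sc, sc+l)]) and \
--                     all([grid[r][sc] for r in range(sr, sr+l)]) and \
--                     all([grid[r][sc+l-1] for r in range(sr, sr+l)]):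
--                     return l*l
--
--     return 0
-- ===== SOURCE B (Python) =====
-- from typing import List
--
-- def largest1BorderedSquare1(grid: List[List[int]]) -> int:
--     m, n = len(grid), len(grid[0])
--
--     def runs(vals, pred):
--         out, k = [], 0
--         for v in vals:
--             k = k + 1 if pred(v) else 0
--             out.append(k)
--         return out
--
--     # run-length tables: consecutive cells (== 1 / truthy) ending at each position
--     top1 = [runs(row[:n], lambda v: v == 1) for row in grid]
--     horiz = [runs(row[:n], lambda v: v != 0) for row in grid]
--     vert = [runs([row[c] for row in grid], lambda v: v != 0) for c in range(n)]
--
--     for l in range(min(m, n), 0, -1):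
--         for sr in range(m - l + 1):
--             for sc in range(n - l + 1):
--                 if top1[sr][sc + l - 1] >= l and horiz[sr + l - 1][sc + l - 1] >= l \
--                         and vert[sc][sr + l - 1] >= l and vert[sc + l - 1][sr + l - 1] >= l:
--                     return l * l
--     return 0
-- ===== Notes on version B (the rewrite author's own statement) =====
-- stated objective: faster
-- what changed: B precomputes run-length tables (consecutive ==1 cells leftwards, consecutive nonzero cells leftwards and upwards) once, turning each of A's four O(l) border re-scans into an O(1) table lookup, and only tries side lengths up to min(m,n).
-- outside the precondition, e.g. on largest1BorderedSquare1([[1, 1, 9], [1, 1], [9, 9, 9]]): A returns 4, B raises IndexError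
import Mathlib
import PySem

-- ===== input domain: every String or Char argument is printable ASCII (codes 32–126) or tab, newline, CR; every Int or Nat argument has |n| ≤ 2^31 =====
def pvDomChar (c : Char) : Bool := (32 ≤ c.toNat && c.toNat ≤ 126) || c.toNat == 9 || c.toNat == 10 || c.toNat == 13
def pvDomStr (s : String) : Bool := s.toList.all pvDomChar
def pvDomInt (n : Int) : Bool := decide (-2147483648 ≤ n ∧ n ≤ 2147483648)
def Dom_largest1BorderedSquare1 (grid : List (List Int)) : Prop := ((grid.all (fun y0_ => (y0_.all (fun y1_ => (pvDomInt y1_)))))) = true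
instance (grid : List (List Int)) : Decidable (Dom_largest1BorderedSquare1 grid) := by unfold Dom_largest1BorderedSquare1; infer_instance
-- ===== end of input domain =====

-- B replaces A's O(l) border re-scans by run-length tables of consecutive ==1 / nonzero
-- cells (built once), so each border test becomes four O(1) table lookups.

-- ===== PORT A =====
def largest1BorderedSquare1 (grid : List (List Int)) : Int :=
  let m : Int := grid.length
  let n : Int := (PySem.List.pyGetD grid 0 []).length
  ((PySem.List.pyRange (max m n) 0 (-1)).findSome? (fun l =>
    (PySem.List.pyRange 0 (m - l + 1)).findSome? (fun sr =>
      (PySem.List.pyRange 0 (n - l + 1)).findSome? (fun sc =>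
        if ((PySem.List.pyRange sc (sc + l)).all (fun c => PySem.List.pyGetD (PySem.List.pyGetD grid sr []) c 0 == 1)
            && (PySem.List.pyRange sc (sc + l)).all (fun c => PySem.List.pyGetD (PySem.List.pyGetD grid (sr + l - 1) []) c 0 != 0)
            && (PySem.List.pyRange sr (sr + l)).all (fun r => PySem.List.pyGetD (PySem.List.pyGetD grid r []) sc 0 != 0)
            && (PySem.List.pyRange sr (sr + l)).all (fun r => PySem.List.pyGetD (PySem.List.pyGetD grid r []) (sc + l - 1) 0 != 0))
        then some (l * l) else none)))).getD 0

-- ===== PORT B =====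
-- helper `runs` of Source B: run lengths of consecutive cells satisfying p, ending at each position
def pvRuns (p : Int → Bool) : Int → List Int → List Int
  | _, [] => []
  | k, v :: vs =>
    let k' := if p v then k + 1 else 0
    k' :: pvRuns p k' vs

def largest1BorderedSquare1_alt (grid : List (List Int)) : Int :=
  let m : Int := grid.length
  let n : Int := (PySem.List.pyGetD grid 0 []).length
  let top1 := grid.map (fun row => pvRuns (fun v => v == 1) 0 (PySem.List.slice row none (some n)))
  let horiz := grid.map (fun row => pvRuns (fun v => v != 0) 0 (PySem.List.slice row none (some n)))
  let vert := (PySem.List.pyRange 0 n).map (fun c => pvRuns (fun v => v != 0) 0 (grid.map (fun row => PySem.List.pyGetD row c 0)))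
  ((PySem.List.pyRange (min m n) 0 (-1)).findSome? (fun l =>
    (PySem.List.pyRange 0 (m - l + 1)).findSome? (fun sr =>
      (PySem.List.pyRange 0 (n - l + 1)).findSome? (fun sc =>
        if (decide (l ≤ PySem.List.pyGetD (PySem.List.pyGetD top1 sr []) (sc + l - 1) 0)
            && decide (l ≤ PySem.List.pyGetD (PySem.List.pyGetD horiz (sr + l - 1) []) (sc + l - 1) 0)
            && decide (l ≤ PySem.List.pyGetD (PySem.List.pyGetD vert sc []) (sr + l - 1) 0)
            && decide (l ≤ PySem.List.pyGetD (PySem.List.pyGetD vert (sc + l - 1) []) (sr + l - 1) 0))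
        then some (l * l) else none)))).getD 0

-- ===== PRECONDITION & SPEC =====
-- Pre_ excludes the empty grid (A raises IndexError on grid[0]) and ragged grids with a row
-- shorter than the first, on which A raises IndexError unless its scan happens to return
-- before touching a missing cell — a value that is an accident of the scan order (see cites);
-- B raises IndexError on all such ragged grids.
def Pre_largest1BorderedSquare1 (grid : List (List Int)) : Prop :=
  grid ≠ [] ∧ ∀ row ∈ grid, (PySem.List.pyGetD grid 0 []).length ≤ row.length
instance (grid : List (List Int)) : Decidable (Pre_largest1BorderedSquare1 grid) := by
  unfold Pre_largest1BorderedSquare1; infer_instance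
def pvWitness_largest1BorderedSquare1 : List (List Int) := [[1, 0], [1, 1]]
def Spec_largest1BorderedSquare1 (grid : List (List Int)) (out : Int) : Prop := out = largest1BorderedSquare1_alt grid
instance (grid : List (List Int)) (out : Int) : Decidable (Spec_largest1BorderedSquare1 grid out) := by unfold Spec_largest1BorderedSquare1; infer_instance

-- ===== CLAIM (what is proved, stated in full; the proofs are below) =====
def Claim_equal_largest1BorderedSquare1 : Prop := ∀ (grid : List (List Int)), Dom_largest1BorderedSquare1 grid → Pre_largest1BorderedSquare1 grid → Spec_largest1BorderedSquare1 grid (largest1BorderedSquare1 grid)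

-- ===== LEMMAS AND PROOFS =====

theorem pvRuns_length (p : Int → Bool) (k : Int) (xs : List Int) :
    (pvRuns p k xs).length = xs.length := by
  induction xs generalizing k with
  | nil => rfl
  | cons v vs ih => simp [pvRuns, ih]

theorem pvRuns_nonneg (p : Int → Bool) (k : Int) (xs : List Int) (hk : 0 ≤ k) (j : Nat) :
    0 ≤ (pvRuns p k xs).getD j 0 := by
  induction xs generalizing k j with
  | nil => simp [pvRuns]
  | cons v vs ih =>
    cases j with
    | zero => simp [pvRuns]; split <;> omega
    | succ j' => simpa [pvRuns] using ih _ (by split <;> omega) j'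

theorem pvRuns_getD_zero (p : Int → Bool) (k : Int) (v : Int) (vs : List Int) :
    (pvRuns p k (v :: vs)).getD 0 0 = if p v then k + 1 else 0 := rfl

theorem pvRuns_getD_succ (p : Int → Bool) (xs : List Int) (k : Int) (j : Nat)
    (h : j + 1 < xs.length) :
    (pvRuns p k xs).getD (j + 1) 0
      = if p (xs.getD (j + 1) 0) then (pvRuns p k xs).getD j 0 + 1 else 0 := by
  induction xs generalizing k j with
  | nil => simp at h
  | cons v vs ih =>
    cases j with
    | zero =>
      cases vs with
      | nil => simp at h
      | cons w ws => simp [pvRuns]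
    | succ j' =>
      have := ih (if p v then k + 1 else 0) j' (by simpa using h)
      simpa [pvRuns] using this

-- a run-length entry is ≥ 1 exactly when the cell itself satisfies p
theorem pvRuns_ge_one (p : Int → Bool) (xs : List Int) (j : Nat) (hj : j < xs.length) :
    ((1 : Int) ≤ (pvRuns p 0 xs).getD j 0) ↔ p (xs.getD j 0) = true := by
  cases j with
  | zero =>
    cases xs with
    | nil => simp at hj
    | cons v vs =>
      rw [pvRuns_getD_zero]
      cases hpv : p v
      · simp [hpv]
      · simp [hpv]
  | succ j' =>
    rw [pvRuns_getD_succ p xs 0 j' hj]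
    have hnn := pvRuns_nonneg p 0 xs le_rfl j'
    rw [List.getD_eq_getElem?_getD] at hnn
    cases hpv : p (xs.getD (j' + 1) 0)
    · simp
    · simp
      omega

-- a run-length entry is ≥ l exactly when the l cells ending there all satisfy p
theorem pvRuns_char (p : Int → Bool) (xs : List Int) :
    ∀ (l j : Nat), 1 ≤ l → l ≤ j + 1 → j < xs.length →
      (((l : Int) ≤ (pvRuns p 0 xs).getD j 0) ↔
        ∀ i : Nat, j + 1 - l ≤ i → i ≤ j → p (xs.getD i 0) = true) := by
  intro l
  induction l with
  | zero => omega
  | succ l' ih =>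
    intro j h1 h2 hj
    by_cases hl' : 1 ≤ l'
    · obtain ⟨j', rfl⟩ : ∃ j'', j = j'' + 1 := ⟨j - 1, by omega⟩
      rw [pvRuns_getD_succ p xs 0 j' hj]
      by_cases hp : p (xs.getD (j' + 1) 0) = true
      · rw [if_pos hp]
        have hIH := ih j' hl' (by omega) (by omega)
        constructor
        · intro h i hi1 hi2
          rcases Nat.lt_or_ge i (j' + 1) with hlt | hge
          · exact (hIH.mp (by omega)) i (by omega) (by omega)
          · have : i = j' + 1 := by omega
            simpa [this] using hp
        · intro h
          have : (l' : Int) ≤ (pvRuns p 0 xs).getD j' 0 :=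
            hIH.mpr (fun i hi1 hi2 => h i (by omega) (by omega))
          push_cast
          omega
      · rw [if_neg hp]
        constructor
        · intro h; exfalso; push_cast at h; omega
        · intro h; exact absurd (h (j' + 1) (by omega) le_rfl) hp
    · have : l' = 0 := by omega
      subst this
      have hg := pvRuns_ge_one p xs j hj
      rw [show ((0 + 1 : Nat) : Int) = 1 by norm_num, hg]
      constructor
      · intro h i hi1 hi2
        have : i = j := by omega
        simpa [this] using h
      · intro h; exact h j (by omega) le_rfl

-- core: A's `all`-over-an-interval check expressed through B's run-length value
theorem pvCore (p : Int → Bool) (xs : List Int) (sc l : Int)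
    (hl : 1 ≤ l) (hsc : 0 ≤ sc) (hb : sc + l ≤ (xs.length : Int)) :
    ((l ≤ (pvRuns p 0 xs).getD (sc + l - 1).toNat 0) ↔
      ∀ c : Int, sc ≤ c → c < sc + l → p (xs.getD c.toNat 0) = true) := by
  have hchar := pvRuns_char p xs l.toNat (sc + l - 1).toNat (by omega) (by omega) (by omega)
  rw [show ((l.toNat : Int)) = l by omega] at hchar
  rw [hchar]
  constructor
  · intro h c hc1 hc2
    exact h c.toNat (by omega) (by omega)
  · intro h i hi1 hi2
    have := h (i : Int) (by omega) (by omega)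
    simpa using this

-- a horizontal border scan of A equals B's lookup in a row run-length table
theorem pvHoriz (grid : List (List Int)) (p : Int → Bool) (r sc l : Int)
    (hrow : ∀ row ∈ grid, (PySem.List.pyGetD grid 0 []).length ≤ row.length)
    (hr0 : 0 ≤ r) (hrm : r < (grid.length : Int))
    (hl : 1 ≤ l) (hsc0 : 0 ≤ sc)
    (hscn : sc + l ≤ ((PySem.List.pyGetD grid 0 []).length : Int)) :
    ((PySem.List.pyRange sc (sc + l)).all (fun c => p (PySem.List.pyGetD (PySem.List.pyGetD grid r []) c 0)))
      = decide (l ≤ PySem.List.pyGetD (PySem.List.pyGetD (grid.map (fun row => pvRuns p 0 (PySem.List.slice row none (some ((PySem.List.pyGetD grid 0 []).length : Int))))) r []) (sc + l - 1) 0) := by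
  have hrn : r.toNat < grid.length := by omega
  rw [PySem.List.pyGetD_eq_getElem (grid.map _) _ hr0 (by simpa using hrm),
      PySem.List.pyGetD_eq_getElem grid _ hr0 hrm, List.getElem_map]
  have hrowlen : (PySem.List.pyGetD grid 0 []).length ≤ grid[r.toNat].length :=
    hrow _ (List.getElem_mem hrn)
  rw [PySem.List.slice_to _ (by positivity), Int.toNat_natCast]
  set nn := (PySem.List.pyGetD grid 0 []).length with hnn
  set row := grid[r.toNat] with hrowdef
  set xs := row.take nn with hxsdef
  have hxs : xs.length = nn := by simp [hxsdef, List.length_take]; omega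
  rw [PySem.List.pyGetD_eq_getElem (pvRuns p 0 xs) 0 (by omega)
      (by rw [pvRuns_length]; omega),
      ← List.getD_eq_getElem (pvRuns p 0 xs) 0]
  have hacc : ∀ c : Int, sc ≤ c → c < sc + l →
      PySem.List.pyGetD row c 0 = xs.getD c.toNat 0 := by
    intro c hc1 hc2
    rw [PySem.List.pyGetD_eq_getElem row 0 (by omega) (by omega),
        List.getD_eq_getElem xs 0 (by omega)]
    exact (List.getElem_take).symm
  rw [Bool.eq_iff_iff]
  simp only [List.all_eq_true, PySem.List.mem_pyRange_one, decide_eq_true_eq]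
  rw [pvCore p xs sc l hl hsc0 (by omega)]
  constructor
  · intro h c hc1 hc2
    rw [← hacc c hc1 hc2]; exact h c ⟨hc1, hc2⟩
  · intro h c hc
    rw [hacc c hc.1 hc.2]; exact h c hc.1 hc.2

-- a vertical border scan of A equals B's lookup in a column run-length table
theorem pvVert (grid : List (List Int)) (p : Int → Bool) (c sr l : Int)
    (hc0 : 0 ≤ c) (hcn : c < ((PySem.List.pyGetD grid 0 []).length : Int))
    (hl : 1 ≤ l) (hsr0 : 0 ≤ sr) (hsrm : sr + l ≤ (grid.length : Int)) :
    ((PySem.List.pyRange sr (sr + l)).all (fun r => p (PySem.List.pyGetD (PySem.List.pyGetD grid r []) c 0)))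
      = decide (l ≤ PySem.List.pyGetD (PySem.List.pyGetD ((PySem.List.pyRange 0 ((PySem.List.pyGetD grid 0 []).length : Int)).map (fun c => pvRuns p 0 (grid.map (fun row => PySem.List.pyGetD row c 0)))) c []) (sr + l - 1) 0) := by
  rw [PySem.List.pyGetD_map_pyRange_of_nonneg _ _ c [] hc0 hcn]
  set xs := grid.map (fun row => PySem.List.pyGetD row c 0) with hxsdef
  have hxs : xs.length = grid.length := by simp [hxsdef]
  rw [PySem.List.pyGetD_eq_getElem (pvRuns p 0 xs) 0 (by omega)
      (by rw [pvRuns_length]; omega),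
      ← List.getD_eq_getElem (pvRuns p 0 xs) 0]
  have hacc : ∀ r : Int, sr ≤ r → r < sr + l →
      PySem.List.pyGetD (PySem.List.pyGetD grid r []) c 0 = xs.getD r.toNat 0 := by
    intro r hr1 hr2
    rw [PySem.List.pyGetD_eq_getElem grid _ (by omega) (by omega),
        List.getD_eq_getElem xs 0 (by omega)]
    simp only [hxsdef, List.getElem_map]
  rw [Bool.eq_iff_iff]
  simp only [List.all_eq_true, PySem.List.mem_pyRange_one, decide_eq_true_eq]
  rw [pvCore p xs sr l hl hsr0 (by omega)]
  constructor
  · intro h r hr1 hr2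
    rw [← hacc r hr1 hr2]; exact h r ⟨hr1, hr2⟩
  · intro h r hr
    rw [hacc r hr.1 hr.2]; exact h r hr.1 hr.2

theorem pvFindSome?_congr {α β : Type} (xs : List α) (f g : α → Option β)
    (h : ∀ x ∈ xs, f x = g x) : xs.findSome? f = xs.findSome? g := by
  induction xs with
  | nil => rfl
  | cons a as ih =>
    rw [List.findSome?_cons, List.findSome?_cons, h a List.mem_cons_self,
        ih (fun x hx => h x (List.mem_cons_of_mem a hx))]

-- ===== VERDICT (by name: the statement is the Claim_ definition above) =====
theorem largest1BorderedSquare1_spec : Claim_equal_largest1BorderedSquare1 := by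
  intro grid _hdom hpre
  obtain ⟨hne, hrow⟩ := hpre
  unfold Spec_largest1BorderedSquare1
  simp only [largest1BorderedSquare1, largest1BorderedSquare1_alt]
  set m : Int := (grid.length : Int) with hm
  set nI : Int := ((PySem.List.pyGetD grid 0 []).length : Int) with hnI
  have hm1 : 1 ≤ m := by
    rw [hm]; exact_mod_cast Nat.succ_le_of_lt (List.length_pos_of_ne_nil hne)
  have hn0 : 0 ≤ nI := by rw [hnI]; positivity
  congr 1
  have hsplit : PySem.List.pyRange (max m nI) 0 (-1)
      = PySem.List.pyRange (max m nI) (min m nI) (-1) ++ PySem.List.pyRange (min m nI) 0 (-1) := by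
    rw [PySem.List.pyRange_neg_one_eq_reverse, PySem.List.pyRange_neg_one_eq_reverse,
        PySem.List.pyRange_neg_one_eq_reverse, ← List.reverse_append,
        ← PySem.List.pyRange_one_append (0 + 1) (min m nI + 1) (max m nI + 1) (by omega) (by omega)]
  rw [hsplit, List.findSome?_append]
  have hnone : (PySem.List.pyRange (max m nI) (min m nI) (-1)).findSome? (fun l =>
      (PySem.List.pyRange 0 (m - l + 1)).findSome? (fun sr =>
        (PySem.List.pyRange 0 (nI - l + 1)).findSome? (fun sc =>
          if ((PySem.List.pyRange sc (sc + l)).all (fun c => PySem.List.pyGetD (PySem.List.pyGetD grid sr []) c 0 == 1)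
              && (PySem.List.pyRange sc (sc + l)).all (fun c => PySem.List.pyGetD (PySem.List.pyGetD grid (sr + l - 1) []) c 0 != 0)
              && (PySem.List.pyRange sr (sr + l)).all (fun r => PySem.List.pyGetD (PySem.List.pyGetD grid r []) sc 0 != 0)
              && (PySem.List.pyRange sr (sr + l)).all (fun r => PySem.List.pyGetD (PySem.List.pyGetD grid r []) (sc + l - 1) 0 != 0))
          then some (l * l) else none))) = none := by
    rw [List.findSome?_eq_none_iff]
    intro l hl
    rw [PySem.List.mem_pyRange_neg_one] at hl
    by_cases hlm : m < l
    · rw [PySem.List.pyRange_one_eq_nil (show m - l + 1 ≤ 0 by omega)]; rfl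
    · have hln : nI < l := by omega
      rw [List.findSome?_eq_none_iff]
      intro sr _
      rw [PySem.List.pyRange_one_eq_nil (show nI - l + 1 ≤ 0 by omega)]; rfl
  rw [hnone, Option.none_or]
  apply pvFindSome?_congr
  intro l hl
  rw [PySem.List.mem_pyRange_neg_one] at hl
  apply pvFindSome?_congr
  intro sr hsr
  rw [PySem.List.mem_pyRange_one] at hsr
  apply pvFindSome?_congr
  intro sc hsc
  rw [PySem.List.mem_pyRange_one] at hsc
  rw [pvHoriz grid (fun v => v == 1) sr sc l hrow (by omega) (by omega) (by omega) (by omega) (by omega),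
      pvHoriz grid (fun v => v != 0) (sr + l - 1) sc l hrow (by omega) (by omega) (by omega) (by omega) (by omega),
      pvVert grid (fun v => v != 0) sc sr l (by omega) (by omega) (by omega) (by omega) (by omega),
      pvVert grid (fun v => v != 0) (sc + l - 1) sr l (by omega) (by omega) (by omega) (by omega) (by omega)]
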